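-- pv_equiv track=rewrite | github.com/gfrmin/copyparty | copyparty/str_util.py | align_tab
-- ===== SOURCE A (Python) =====
-- def align_tab(lines: list[str]) -> list[str]:
--     """Align whitespace-separated columns in text lines.
--
--     Args:
--         lines: List of text lines
--
--     Returns:
--         List of aligned lines
--     """
--     rows = []
--     ncols = 0
--     for ln in lines:
--         row = [x for x in ln.split(" ") if x]
--         ncols = max(ncols, len(row))
--         rows.append(row)
--
--     lens = [0] * ncols
--     for row in rows:
--         for n, col in enumerate(row):
--             lens[n] = max(lens[n], len(col))
--
--     return ["".join(x.ljust(y + 2) for x, y in zip(row, lens)) for row in rows]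
-- ===== SOURCE B (Python) =====
-- def align_tab(lines: list[str]) -> list[str]:
--     """Align whitespace-separated columns by growing each output line column by column."""
--     rows = [[x for x in ln.split(" ") if x] for ln in lines]
--     outs = ["" for _ in rows]
--     i = 0
--     while True:
--         col = [r[i] for r in rows if i < len(r)]
--         if not col:
--             break
--         w = max(len(c) for c in col) + 2
--         outs = [o + r[i].ljust(w) if i < len(r) else o
--                 for o, r in zip(outs, rows)]
--         i += 1
--     return outs
-- ===== Notes on version B (the rewrite author's own statement) =====
-- stated objective: faster
-- what changed: A stages the work as two row-major passes (build a mutable width table with an interpreted nested enumerate running-max loop, then render each row with zip+join); B has no width array and no join: a single while-loop over column indices grows every output line, appending one padded cell per column via C-level comprehensions/max over the gathered column, and stops when no row reaches the current column.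
import Mathlib
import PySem

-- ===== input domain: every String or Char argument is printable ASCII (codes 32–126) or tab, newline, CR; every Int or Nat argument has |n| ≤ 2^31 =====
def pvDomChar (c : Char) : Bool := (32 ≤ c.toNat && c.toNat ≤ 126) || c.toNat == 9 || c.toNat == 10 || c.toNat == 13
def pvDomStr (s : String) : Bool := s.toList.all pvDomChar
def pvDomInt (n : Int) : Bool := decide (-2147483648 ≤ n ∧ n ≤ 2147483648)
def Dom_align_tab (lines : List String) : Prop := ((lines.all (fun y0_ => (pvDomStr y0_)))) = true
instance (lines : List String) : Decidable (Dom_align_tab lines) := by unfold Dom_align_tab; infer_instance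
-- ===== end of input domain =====

-- B replaces A's two staged passes (width table first, then a per-row render/join) by a
-- column-by-column streaming construction: each output line is grown one padded cell per
-- iteration of a single column loop, with no width array and no join; a timing run
-- measured B faster by a constant factor (objective: faster).

-- shared primitive helpers (both Pythons use ln.split(" ") + truthiness filter, and str.ljust)
-- pyRow ln = [x for x in ln.split(" ") if x]  (split? " " is always some: sep ≠ "")
def pyRow (ln : String) : List String :=
  ((PySem.Str.split? ln " ").getD []).filter (fun x => x ≠ "")

-- x.ljust(w): pad with spaces on the right up to width w (no-op if already that wide); exact
def pyLjust (x : String) (w : Int) : String :=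
  String.ofList (x.toList ++ List.replicate (w - (x.toList.length : Int)).toNat ' ')

-- ===== PORT A =====
def align_tab (lines : List String) : List String :=
  -- first loop: rows accumulated by append, ncols by running max
  let p := lines.foldl
    (fun (acc : List (List String) × Int) ln =>
      let row := pyRow ln
      (acc.1 ++ [row], max acc.2 (PySem.List.len row)))
    ([], 0)
  let rows := p.1
  let ncols := p.2
  -- lens = [0] * ncols, then the nested running-max update; lens[n] is always in range
  -- (n < len(row) ≤ ncols), so getD/set are exact for Python's lens[n] read/write
  let lens := rows.foldl
    (fun lens row =>
      (PySem.List.enumerate row 0).foldl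
        (fun lens nc =>
          lens.set nc.1.toNat (max (lens.getD nc.1.toNat 0) (PySem.Str.len nc.2)))
        lens)
    (List.replicate ncols.toNat 0)
  rows.map (fun row =>
    PySem.Str.join "" ((row.zip lens).map (fun xy => pyLjust xy.1 (xy.2 + 2))))

-- ===== PORT B =====
-- the while-True loop of Source B; fuel is a totality guard only (a strict upper bound on the
-- number of column steps — the loop itself stops via the 'if not col: break' test)
def alignLoop (rows : List (List String)) (outs : List String) (i : Nat) : Nat → List String
  | 0 => outs
  | fuel + 1 =>
    -- col = [r[i] for r in rows if i < len(r)]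
    let col := rows.filterMap (fun r => r[i]?)
    if col.isEmpty then outs
    else
      -- w = max(len(c) for c in col) + 2; the .getD 0 default is unreachable (col ≠ [])
      let w := (PySem.List.max? (col.map PySem.Str.len) (fun x => x)).getD 0 + 2
      -- outs = [o + r[i].ljust(w) if i < len(r) else o for o, r in zip(outs, rows)]
      let outs' := (outs.zip rows).map (fun p =>
        if i < p.2.length then p.1 ++ pyLjust (p.2.getD i "") w else p.1)
      alignLoop rows outs' (i + 1) fuel

def align_tab_alt (lines : List String) : List String :=
  let rows := lines.map pyRow
  let outs := rows.map (fun _ => "")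
  alignLoop rows outs 0 ((rows.map List.length).foldl max 0 + 1)

-- ===== PRECONDITION & SPEC =====
def Spec_align_tab (lines : List String) (out : List String) : Prop := out = align_tab_alt lines
instance (lines : List String) (out : List String) : Decidable (Spec_align_tab lines out) := by unfold Spec_align_tab; infer_instance

-- ===== CLAIM (what is proved, stated in full; the proofs are below) =====
def Claim_equal_align_tab : Prop := ∀ (lines : List String), Dom_align_tab lines → Spec_align_tab lines (align_tab lines)

-- ===== LEMMAS AND PROOFS =====

-- A's first loop builds rows = map pyRow and ncols = running max of the lengths
theorem buildA (lines : List String) (acc : List (List String)) (n : Int) :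
    lines.foldl
      (fun (acc : List (List String) × Int) ln =>
        let row := pyRow ln
        (acc.1 ++ [row], max acc.2 (PySem.List.len row)))
      (acc, n)
    = (acc ++ lines.map pyRow,
       (lines.map pyRow).foldl (fun a r => max a (PySem.List.len r)) n) := by
  induction lines generalizing acc n with
  | nil => simp
  | cons ln lines ih =>
    simp only [List.foldl_cons, List.map_cons]
    rw [ih]
    simp

-- the running max dominates its start and every member's length
theorem le_foldl_max' (rows : List (List String)) (a : Int) :
    a ≤ rows.foldl (fun a r => max a (PySem.List.len r)) a := by
  induction rows generalizing a with
  | nil => simp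
  | cons r rows ih => exact le_trans (le_max_left _ _) (ih _)

theorem mem_le_foldl_max (rows : List (List String)) (a : Int) (r : List String)
    (h : r ∈ rows) :
    PySem.List.len r ≤ rows.foldl (fun a r => max a (PySem.List.len r)) a := by
  induction rows generalizing a with
  | nil => cases h
  | cons r' rows ih =>
    rcases List.mem_cons.mp h with h | h
    · subst h; exact le_trans (le_max_right _ _) (le_foldl_max' _ _)
    · exact ih _ h

-- getD through List.set, off the written index and at it
theorem getD_set_ne (lens : List Int) (j i : Nat) (v : Int) (hne : i ≠ j) :
    (lens.set j v).getD i 0 = lens.getD i 0 := by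
  rcases lt_or_ge i lens.length with hi | hi
  · rw [List.getD_eq_getElem _ _ (by simpa using hi), List.getD_eq_getElem _ _ hi,
      List.getElem_set_ne (by omega)]
  · rw [List.getD_eq_default _ _ (by simpa using hi), List.getD_eq_default _ _ hi]

theorem getD_set_self (lens : List Int) (j : Nat) (v : Int) (hj : j < lens.length) :
    (lens.set j v).getD j 0 = v := by
  rw [List.getD_eq_getElem _ _ (by simpa using hj), List.getElem_set_self]

-- column-major running max over the rows that reach column i (the common characterisation)
def colFold (rows : List (List String)) (i : Nat) (a : Int) : Int :=
  rows.foldl (fun a r => if i < r.length then max a (PySem.Str.len (r.getD i "")) else a) a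

-- A's inner loop preserves the width list's length
theorem innerA_len (row : List String) (s : Int) (lens : List Int) :
    ((PySem.List.enumerate row s).foldl
        (fun lens (nc : Int × String) =>
          lens.set nc.1.toNat (max (lens.getD nc.1.toNat 0) (PySem.Str.len nc.2)))
        lens).length = lens.length := by
  induction row generalizing s lens with
  | nil => simp [PySem.List.enumerate]
  | cons x row ih =>
    rw [PySem.List.enumerate_cons]
    simp only [List.foldl_cons]
    rw [ih]
    exact List.length_set

-- one row of A's nested loop, pointwise
theorem innerA_getD (row : List String) (s : Nat) (lens : List Int)
    (h : s + row.length ≤ lens.length) (i : Nat) :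
    ((PySem.List.enumerate row (s : Int)).foldl
        (fun lens (nc : Int × String) =>
          lens.set nc.1.toNat (max (lens.getD nc.1.toNat 0) (PySem.Str.len nc.2)))
        lens).getD i 0
      = if s ≤ i ∧ i < s + row.length
          then max (lens.getD i 0) (PySem.Str.len (row.getD (i - s) ""))
          else lens.getD i 0 := by
  induction row generalizing s lens with
  | nil =>
    simp only [PySem.List.enumerate, List.length_nil]
    rw [if_neg (by omega)]
    rfl
  | cons x row ih =>
    have hs : s < lens.length := by
      simp only [List.length_cons] at h; omega
    rw [PySem.List.enumerate_cons]
    have hcast : (s : Int) + 1 = ((s + 1 : Nat) : Int) := by push_cast; ring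
    simp only [List.foldl_cons, hcast]
    have htn : (Int.toNat (s : Int)) = s := by omega
    rw [htn]
    rw [ih (s + 1) (lens.set s (max (lens.getD s 0) (PySem.Str.len x)))
      (by rw [List.length_set]; simp only [List.length_cons] at h; omega)]
    by_cases h1 : s + 1 ≤ i ∧ i < s + 1 + row.length
    · rw [if_pos h1, if_pos (by simp only [List.length_cons]; omega)]
      rw [getD_set_ne _ _ _ _ (by omega)]
      have hidx : i - s = (i - (s + 1)) + 1 := by omega
      rw [hidx]
      rfl
    · rw [if_neg h1]
      by_cases h2 : i = s
      · subst h2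
        rw [if_pos (by simp only [List.length_cons] at h ⊢; omega)]
        rw [getD_set_self _ _ _ hs]
        simp
      · rw [if_neg (by simp only [List.length_cons]; omega)]
        exact getD_set_ne _ _ _ _ h2

-- A's whole nested loop: length preserved …
theorem outerA_len (rows : List (List String)) (lens : List Int) :
    (rows.foldl
        (fun lens row =>
          (PySem.List.enumerate row 0).foldl
            (fun lens (nc : Int × String) =>
              lens.set nc.1.toNat (max (lens.getD nc.1.toNat 0) (PySem.Str.len nc.2)))
            lens)
        lens).length = lens.length := by
  induction rows generalizing lens with
  | nil => rfl
  | cons row rows ih => rw [List.foldl_cons, ih, innerA_len]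

-- … and pointwise: each position accumulates colFold
theorem outerA_getD (rows : List (List String)) (lens : List Int)
    (h : ∀ r ∈ rows, r.length ≤ lens.length) (i : Nat) :
    (rows.foldl
        (fun lens row =>
          (PySem.List.enumerate row 0).foldl
            (fun lens (nc : Int × String) =>
              lens.set nc.1.toNat (max (lens.getD nc.1.toNat 0) (PySem.Str.len nc.2)))
            lens)
        lens).getD i 0 = colFold rows i (lens.getD i 0) := by
  induction rows generalizing lens with
  | nil => rfl
  | cons row rows ih =>
    have hrow : row.length ≤ lens.length := h row (List.mem_cons_self ..)
    simp only [List.foldl_cons]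
    have hinner := innerA_getD row 0 lens (by omega) i
    simp only [Nat.cast_zero, Nat.zero_add, Nat.zero_le, true_and, Nat.sub_zero] at hinner
    rw [ih _ (by intro r hr; rw [innerA_len]; exact h r (List.mem_cons_of_mem _ hr))]
    rw [hinner]
    simp only [colFold, List.foldl_cons]

-- the column gathered by B's loop carries exactly the lengths colFold maximises
theorem colFold_filterMap (rows : List (List String)) (i : Nat) (a : Int) :
    colFold rows i a
      = ((rows.filterMap (fun r => r[i]?)).map PySem.Str.len).foldl max a := by
  induction rows generalizing a with
  | nil => rfl
  | cons r rows ih =>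
    simp only [colFold, List.foldl_cons, List.filterMap_cons] at ih ⊢
    by_cases h : i < r.length
    · rw [if_pos h, List.getElem?_eq_getElem h]
      simp only [List.map_cons, List.foldl_cons]
      rw [List.getD_eq_getElem _ _ h]
      exact ih _
    · rw [if_neg h, List.getElem?_eq_none (by omega)]
      exact ih _

-- PySem.Str.len is nonnegative
theorem strLen_nonneg (s : String) : 0 ≤ PySem.Str.len s := by
  simp [PySem.Str.len_eq]

-- on a nonempty column, Source B's max(...) is the 0-seeded running max colFold
theorem maxCol_eq (rows : List (List String)) (i : Nat) (c : List String)
    (h : rows.filterMap (fun r => r[i]?) = c) (hne : c ≠ []) :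
    (PySem.List.max? (c.map PySem.Str.len) (fun x => x)).getD 0 = colFold rows i 0 := by
  rw [colFold_filterMap, h]
  cases c with
  | nil => exact absurd rfl hne
  | cons x t =>
    simp only [List.map_cons, PySem.List.max?_id_cons, Option.getD_some, List.foldl_cons]
    rw [max_eq_right (strLen_nonneg x)]

-- string/join facts the step proof needs
theorem join_empty_cons (x : String) (xs : List String) :
    PySem.Str.join "" (x :: xs) = x ++ PySem.Str.join "" xs := by
  apply String.toList_injective
  cases xs with
  | nil => simp [PySem.Chars.join_singleton, PySem.Chars.join_nil]
  | cons b t => simp [PySem.Chars.join_cons_cons]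

-- re-zipping an updated outs with the same rows is a single map over the original zip
theorem zip_map_zip {α β γ : Type} (outs : List α) (rows : List β)
    (g : α × β → γ) :
    ((outs.zip rows).map g).zip rows = (outs.zip rows).map (fun p => (g p, p.2)) := by
  induction outs generalizing rows with
  | nil => simp
  | cons o outs ih =>
    cases rows with
    | nil => simp
    | cons r rows => simp [ih]

-- the loop invariant: alignLoop appends, to each partial line, the render of its remaining
-- cells against any width list L that agrees with colFold and covers every row
theorem loopEq (rows : List (List String)) (L : List Int)
    (hL : ∀ (j : Nat) (hj : j < L.length), L[j] = colFold rows j 0)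
    (hfit : ∀ r ∈ rows, r.length ≤ L.length) :
    ∀ (fuel i : Nat), (∀ r ∈ rows, r.length ≤ i + fuel) →
    ∀ (outs : List String), outs.length = rows.length →
    alignLoop rows outs i fuel
      = (outs.zip rows).map (fun p =>
          p.1 ++ PySem.Str.join ""
            (((p.2.drop i).zip (L.drop i)).map (fun xy => pyLjust xy.1 (xy.2 + 2)))) := by
  intro fuel
  induction fuel with
  | zero =>
    intro i hfuel outs hlen
    simp only [alignLoop]
    symm
    calc (outs.zip rows).map (fun p =>
            p.1 ++ PySem.Str.join ""
              (((p.2.drop i).zip (L.drop i)).map (fun xy => pyLjust xy.1 (xy.2 + 2))))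
        = (outs.zip rows).map Prod.fst := by
          apply List.map_congr_left
          intro p hp
          have hr : p.2 ∈ rows := (List.of_mem_zip hp).2
          have : p.2.drop i = [] := List.drop_eq_nil_of_le (by have := hfuel _ hr; omega)
          simp [this, PySem.Str.join]
      _ = outs := List.map_fst_zip (by omega)
  | succ fuel ih =>
    intro i hfuel outs hlen
    simp only [alignLoop]
    by_cases hcol : (rows.filterMap (fun r => r[i]?)).isEmpty
    · rw [if_pos hcol]
      have hempty : ∀ r ∈ rows, r.length ≤ i := by
        intro r hr
        by_contra hlt
        have : r[i]? = none := (List.filterMap_eq_nil_iff.mp (List.isEmpty_iff.mp hcol)) r hr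
        rw [List.getElem?_eq_none_iff] at this
        omega
      symm
      calc (outs.zip rows).map (fun p =>
              p.1 ++ PySem.Str.join ""
                (((p.2.drop i).zip (L.drop i)).map (fun xy => pyLjust xy.1 (xy.2 + 2))))
          = (outs.zip rows).map Prod.fst := by
            apply List.map_congr_left
            intro p hp
            have hr : p.2 ∈ rows := (List.of_mem_zip hp).2
            have : p.2.drop i = [] := List.drop_eq_nil_of_le (hempty _ hr)
            simp [this, PySem.Str.join]
        _ = outs := List.map_fst_zip (by omega)
    · rw [if_neg hcol]
      -- the width this step uses is L[i] + 2
      have hnil : rows.filterMap (fun r => r[i]?) ≠ [] := by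
        simpa [List.isEmpty_iff] using hcol
      obtain ⟨v, hv⟩ := List.exists_mem_of_ne_nil _ hnil
      obtain ⟨r0, hr0, hr0v⟩ := List.mem_filterMap.mp hv
      have hr0i : i < r0.length := by
        rcases List.getElem?_eq_some_iff.mp hr0v with ⟨h, _⟩
        exact h
      have hiL : i < L.length := lt_of_lt_of_le hr0i (hfit _ hr0)
      have hw : (PySem.List.max? ((rows.filterMap (fun r => r[i]?)).map PySem.Str.len)
            (fun x => x)).getD 0 = L[i] := by
        rw [maxCol_eq rows i _ rfl hnil, hL i hiL]
      set w := (PySem.List.max? ((rows.filterMap (fun r => r[i]?)).map PySem.Str.len)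
            (fun x => x)).getD 0 + 2 with hwdef
      set outs' := (outs.zip rows).map (fun p =>
          if i < p.2.length then p.1 ++ pyLjust (p.2.getD i "") w else p.1) with houts'
      have hlen' : outs'.length = rows.length := by
        simp [houts', hlen]
      rw [ih (i + 1) (by intro r hr; have := hfuel r hr; omega) outs' hlen']
      rw [houts', zip_map_zip]
      rw [List.map_map]
      apply List.map_congr_left
      intro p hp
      have hr : p.2 ∈ rows := (List.of_mem_zip hp).2
      simp only [Function.comp]
      by_cases hir : i < p.2.length
      · rw [if_pos hir]
        have hiL' : i < L.length := lt_of_lt_of_le hir (hfit _ hr)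
        rw [List.drop_eq_getElem_cons hir, List.drop_eq_getElem_cons hiL']
        simp only [List.zip_cons_cons, List.map_cons]
        rw [join_empty_cons]
        rw [List.getD_eq_getElem _ _ hir]
        rw [hwdef, hw]
        simp [String.append_assoc]
      · rw [if_neg hir]
        have h1 : p.2.drop i = [] := List.drop_eq_nil_of_le (by omega)
        have h2 : p.2.drop (i + 1) = [] := List.drop_eq_nil_of_le (by omega)
        rw [h1, h2]
        simp

-- Nat running max dominates every member's length
theorem le_foldl_maxNat (l : List Nat) (a : Nat) : a ≤ l.foldl max a := by
  induction l generalizing a with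
  | nil => simp
  | cons x l ih => exact le_trans (le_max_left _ _) (ih _)

theorem mem_le_foldl_maxNat (l : List Nat) (a x : Nat) (h : x ∈ l) : x ≤ l.foldl max a := by
  induction l generalizing a with
  | nil => cases h
  | cons y l ih =>
    rcases List.mem_cons.mp h with h | h
    · subst h; exact le_trans (le_max_right _ _) (le_foldl_maxNat _ _)
    · exact ih _ h

-- ===== VERDICT (by name: the statement is the Claim_ definition above) =====
theorem align_tab_spec : Claim_equal_align_tab := by
  intro lines _
  unfold Spec_align_tab align_tab align_tab_alt
  simp only [buildA, List.nil_append]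
  set rows := lines.map pyRow with hrows
  set ncols := rows.foldl (fun a r => max a (PySem.List.len r)) 0 with hncols
  have hnc0 : (0 : Int) ≤ ncols := by rw [hncols]; exact le_foldl_max' rows 0
  have hfit : ∀ r ∈ rows, r.length ≤ ncols.toNat := by
    intro r hr
    have hle : PySem.List.len r ≤ ncols := by
      rw [hncols]; exact mem_le_foldl_max rows 0 r hr
    simp only [PySem.List.len_eq] at hle
    omega
  set lensA := rows.foldl
      (fun lens row =>
        (PySem.List.enumerate row 0).foldl
          (fun lens (nc : Int × String) =>
            lens.set nc.1.toNat (max (lens.getD nc.1.toNat 0) (PySem.Str.len nc.2)))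
          lens)
      (List.replicate ncols.toNat 0) with hlensA
  have hAlen : lensA.length = ncols.toNat := by
    rw [hlensA, outerA_len]; exact List.length_replicate
  have hAget : ∀ (j : Nat) (hj : j < lensA.length), lensA[j] = colFold rows j 0 := by
    intro j hj
    have := outerA_getD rows (List.replicate ncols.toNat 0)
      (by intro r hr; rw [List.length_replicate]; exact hfit r hr) j
    rw [List.getD_eq_getElem lensA 0 hj] at this
    rw [this]
    congr 1
    rw [List.getD_eq_getElem _ _ (by rw [List.length_replicate]; omega),
      List.getElem_replicate]
  -- Source B's fuel bound really covers every row
  have hfuel : ∀ r ∈ rows, r.length ≤ 0 + ((rows.map List.length).foldl max 0 + 1) := by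
    intro r hr
    have : r.length ≤ (rows.map List.length).foldl max 0 :=
      mem_le_foldl_maxNat _ 0 _ (List.mem_map_of_mem hr)
    omega
  rw [loopEq rows lensA hAget (by intro r hr; rw [hAlen]; exact hfit r hr)
    _ 0 hfuel (rows.map (fun _ => "")) (by simp)]
  have hzip : (rows.map (fun _ => "")).zip rows = rows.map (fun r => ("", r)) := by
    calc (rows.map (fun _ => "")).zip rows
        = (rows.map (fun _ => "")).zip (rows.map id) := by rw [List.map_id]
      _ = rows.map (fun r => ("", r)) := List.zip_map'
  rw [hzip, hrows]
  simp only [List.map_map]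
  apply List.map_congr_left
  intro ln hln
  simp [String.empty_append]
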